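-- pv_equiv track=rewrite | github.com/XcapeAxis/BalatroAI | trainer/runtime/background_mode_validation.py | _dominant_mode_from_state
-- ===== SOURCE A (Python) =====
-- from typing import Any
--
-- def _dominant_mode_from_state(payload: dict[str, Any]) -> str:
--     rows = payload.get("window_mode_after") if isinstance(payload.get("window_mode_after"), list) else payload.get("windows")
--     if not isinstance(rows, list):
--         return ""
--     for role in ("game_main", "other_balatro", "diagnostic_console"):
--         for row in rows:
--             if not isinstance(row, dict):
--                 continue
--             if str(row.get("role") or "") == role:
--                 return str(row.get("mode") or "")
--     for row in rows:
--         if isinstance(row, dict) and str(row.get("mode") or "").strip():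
--             return str(row.get("mode") or "")
--     return ""
-- ===== SOURCE B (Python) =====
-- def _dominant_mode_from_state(payload):
--     rows = payload.get("window_mode_after") if isinstance(payload.get("window_mode_after"), list) else payload.get("windows")
--     if not isinstance(rows, list):
--         return ""
--     first_by_role = {}
--     fallback = None
--     for row in rows:
--         if not isinstance(row, dict):
--             continue
--         role = str(row.get("role") or "")
--         mode = str(row.get("mode") or "")
--         if role not in first_by_role:
--             first_by_role[role] = mode
--         if fallback is None and mode.strip():
--             fallback = mode
--     for role in ("game_main", "other_balatro", "diagnostic_console"):
--         if role in first_by_role: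
--             return first_by_role[role]
--     return fallback if fallback is not None else ""
-- ===== Notes on version B (the rewrite author's own statement) =====
-- stated objective: alternative
-- what changed: Replaces A's three full scans over rows (one per priority role) plus a fourth fallback scan by a single pass that records the first mode per role in a dict and the first stripped-nonempty mode, then reads the priority tuple from the dict.
import Mathlib
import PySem

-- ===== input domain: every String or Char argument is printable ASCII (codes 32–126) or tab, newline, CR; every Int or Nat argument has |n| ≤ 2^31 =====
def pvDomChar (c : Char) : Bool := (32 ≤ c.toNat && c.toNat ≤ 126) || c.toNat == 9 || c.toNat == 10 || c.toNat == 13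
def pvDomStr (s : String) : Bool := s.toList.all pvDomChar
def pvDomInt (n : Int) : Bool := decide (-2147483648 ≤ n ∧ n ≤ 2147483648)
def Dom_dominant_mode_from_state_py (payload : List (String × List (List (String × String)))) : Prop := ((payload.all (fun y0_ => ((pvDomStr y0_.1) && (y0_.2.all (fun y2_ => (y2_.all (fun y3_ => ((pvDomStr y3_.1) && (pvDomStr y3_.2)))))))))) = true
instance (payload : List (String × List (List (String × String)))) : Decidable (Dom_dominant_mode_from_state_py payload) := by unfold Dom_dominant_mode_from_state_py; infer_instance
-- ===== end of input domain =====

-- B replaces A's three priority scans plus a fallback scan by ONE pass recording the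
-- first mode per role and the first stripped-nonempty mode (alternative decomposition).

-- ===== PORT A =====
-- str(row.get(k) or "") on a str->str dict is just the value with default "" (identity on nonempty, "" on ""/missing)
def pvRowGet (row : List (String × String)) (k : String) : String :=
  (row.lookup k).getD ""

-- inner 'for row in rows: if str(row.get("role") or "") == role: return str(row.get("mode") or "")'
def pvFindRole (rows : List (List (String × String))) (role : String) : Option String :=
  match rows with
  | [] => none
  | r :: t => if pvRowGet r "role" = role then some (pvRowGet r "mode") else pvFindRole t role

-- final 'for row in rows: if str(row.get("mode") or "").strip(): return str(row.get("mode") or "")'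
def pvFallbackA (rows : List (List (String × String))) : String :=
  match rows with
  | [] => ""
  | r :: t => if PySem.Str.strip (pvRowGet r "mode") ≠ "" then pvRowGet r "mode" else pvFallbackA t

def dominant_mode_from_state_py (payload : List (String × List (List (String × String)))) : String :=
  match (payload.lookup "window_mode_after").or (payload.lookup "windows") with
  | none => ""
  | some rows =>
    match pvFindRole rows "game_main" with
    | some m => m
    | none =>
      match pvFindRole rows "other_balatro" with
      | some m => m
      | none =>
        match pvFindRole rows "diagnostic_console" with
        | some m => m
        | none => pvFallbackA rows

-- ===== PORT B =====
-- single pass: first mode per role into a dict, plus first stripped-nonempty mode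
def pvScanB (rows : List (List (String × String))) (d : PySem.Dict String String)
    (fb : Option String) : PySem.Dict String String × Option String :=
  match rows with
  | [] => (d, fb)
  | r :: t =>
    let role := (r.lookup "role").getD ""
    let mode := (r.lookup "mode").getD ""
    let d' := if d.contains role then d else d.insert role mode
    let fb' := if fb.isNone ∧ PySem.Str.strip mode ≠ "" then some mode else fb
    pvScanB t d' fb'

def dominant_mode_from_state_py_alt (payload : List (String × List (List (String × String)))) : String :=
  match (payload.lookup "window_mode_after").or (payload.lookup "windows") with
  | none => ""
  | some rows =>
    let p := pvScanB rows PySem.Dict.empty none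
    match ["game_main", "other_balatro", "diagnostic_console"].find? (fun role => p.1.contains role) with
    | some role => p.1.getD role ""
    | none => p.2.getD ""

-- ===== PRECONDITION & SPEC =====
def Spec_dominant_mode_from_state_py (payload : List (String × List (List (String × String)))) (out : String) : Prop := out = dominant_mode_from_state_py_alt payload
instance (payload : List (String × List (List (String × String)))) (out : String) : Decidable (Spec_dominant_mode_from_state_py payload out) := by unfold Spec_dominant_mode_from_state_py; infer_instance

-- ===== CLAIM (what is proved, stated in full; the proofs are below) =====
def Claim_equal_dominant_mode_from_state_py : Prop := ∀ (payload : List (String × List (List (String × String)))), Dom_dominant_mode_from_state_py payload → Spec_dominant_mode_from_state_py payload (dominant_mode_from_state_py payload)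

-- ===== LEMMAS AND PROOFS =====

-- the dict built by the scan answers role lookups like A's first-match scan
theorem pvScanB_get (rows : List (List (String × String))) (d : PySem.Dict String String)
    (fb : Option String) (ρ : String) :
    (pvScanB rows d fb).1.get? ρ = (d.get? ρ).or (pvFindRole rows ρ) := by
  induction rows generalizing d fb with
  | nil => simp [pvScanB, pvFindRole]
  | cons r t ih =>
    simp only [pvScanB, pvFindRole, pvRowGet]
    by_cases hρ : (r.lookup "role").getD "" = ρ
    · subst hρ
      by_cases hc : d.contains ((r.lookup "role").getD "") = true
      · rw [PySem.Dict.contains_eq_isSome_get?] at hc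
        obtain ⟨v, hv⟩ := Option.isSome_iff_exists.mp hc
        rw [PySem.Dict.contains_eq_isSome_get?]
        simp only [hv, Option.isSome_some, if_true, ih, Option.some_or]
      · have hnone : d.get? ((r.lookup "role").getD "") = none := by
          rw [PySem.Dict.contains_eq_isSome_get?] at hc
          exact Option.not_isSome_iff_eq_none.mp (by simpa using hc)
        rw [PySem.Dict.contains_eq_isSome_get?]
        simp only [hnone, Option.isSome_none, Bool.false_eq_true, if_false, ih,
          PySem.Dict.get?_insert_self, Option.some_or, Option.none_or]
        simp
    · have hne : ρ ≠ (r.lookup "role").getD "" := fun h => hρ h.symm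
      by_cases hc : d.contains ((r.lookup "role").getD "") = true
      · simp only [hc, if_true, ih, if_neg hρ]
      · simp only [hc, if_false, Bool.false_eq_true, ih, PySem.Dict.get?_insert, if_neg hne, if_neg hρ]

-- once the fallback is set the scan keeps it
theorem pvScanB_fb_some (rows : List (List (String × String))) (d : PySem.Dict String String)
    (m : String) : (pvScanB rows d (some m)).2 = some m := by
  induction rows generalizing d with
  | nil => rfl
  | cons r t ih => simp only [pvScanB]; simp [ih]

-- the fallback accumulator answers like A's last scan
theorem pvScanB_fb (rows : List (List (String × String))) (d : PySem.Dict String String) :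
    (pvScanB rows d none).2.getD "" = pvFallbackA rows := by
  induction rows generalizing d with
  | nil => rfl
  | cons r t ih =>
    simp only [pvScanB, pvFallbackA, pvRowGet, Option.isNone_none, true_and]
    by_cases hs : PySem.Str.strip ((r.lookup "mode").getD "") ≠ ""
    · rw [if_pos hs, if_pos hs, pvScanB_fb_some]
      rfl
    · rw [if_neg hs, if_neg hs, ih]

theorem pvScanB_get_empty (rows : List (List (String × String))) (ρ : String) :
    (pvScanB rows PySem.Dict.empty none).1.get? ρ = pvFindRole rows ρ := by
  rw [pvScanB_get, PySem.Dict.get?_empty, Option.none_or]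

-- ===== VERDICT (by name: the statement is the Claim_ definition above) =====
theorem dominant_mode_from_state_py_spec : Claim_equal_dominant_mode_from_state_py := by
  intro payload _
  unfold Spec_dominant_mode_from_state_py dominant_mode_from_state_py dominant_mode_from_state_py_alt
  cases hrows : (payload.lookup "window_mode_after").or (payload.lookup "windows") with
  | none => rfl
  | some rows =>
    have hcon : ∀ ρ, (pvScanB rows PySem.Dict.empty none).1.contains ρ = (pvFindRole rows ρ).isSome := by
      intro ρ
      rw [PySem.Dict.contains_eq_isSome_get?, pvScanB_get_empty]
    have hgd : ∀ ρ, (pvScanB rows PySem.Dict.empty none).1.getD ρ "" = (pvFindRole rows ρ).getD "" := by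
      intro ρ
      rw [PySem.Dict.getD_eq_get?_getD, pvScanB_get_empty]
    have hfb := pvScanB_fb rows PySem.Dict.empty
    simp only [List.find?, hcon, hgd]
    cases h1 : pvFindRole rows "game_main" with
    | some m => simp [h1]
    | none =>
      cases h2 : pvFindRole rows "other_balatro" with
      | some m => simp [h2]
      | none =>
        cases h3 : pvFindRole rows "diagnostic_console" with
        | some m => simp [h3]
        | none => simp [hfb]
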